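-- pv_equiv track=rewrite | github.com/SIDDHARThMNC/DATA-SCIENCE- | ai ml/bert_tokenizer_demo.py | bert_tokenize
-- ===== SOURCE A (Python) =====
-- def bert_tokenize(text):
--     # Convert to lowercase and split
--     tokens = text.lower().split()
--
--     # Add special tokens
--     tokens = ['[CLS]'] + tokens + ['[SEP]']
--
--     # Simulate subword tokenization
--     subword_tokens = []
--     for token in tokens:
--         if len(token) > 6 and token not in ['[CLS]', '[SEP]']:
--             # Split long words into subwords
--             mid = len(token) // 2
--             subword_tokens.extend([token[:mid], '##' + token[mid:]])
--         else:
--             subword_tokens.append(token)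
--
--     return subword_tokens
-- ===== SOURCE B (Python) =====
-- def bert_tokenize(text):
--     # single character-level scan: build each word char by char (lowercasing as we
--     # go), flush it as one token or two subword pieces at every whitespace boundary
--     out = ['[CLS]']
--     cur = ''
--     for c in text:
--         if c.isspace():
--             _flush(out, cur)
--             cur = ''
--         else:
--             cur += c.lower()
--     _flush(out, cur)
--     out.append('[SEP]')
--     return out
--
--
-- def _flush(out, cur):
--     if not cur:
--         return
--     if len(cur) > 6:
--         mid = len(cur) // 2
--         out.append(cur[:mid])
--         out.append('##' + cur[mid:])
--     else:
--         out.append(cur)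
-- ===== Notes on version B (the rewrite author's own statement) =====
-- stated objective: alternative
-- what changed: B is a single character-level scanner: it walks the raw text once with a current-word accumulator, lowercasing per character and emitting the word (split in half with '##' when longer than 6) at each whitespace boundary, instead of A's staged lower-whole-string / split-into-words / second loop over a special-token-padded token list with a membership guard.
import Mathlib
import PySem

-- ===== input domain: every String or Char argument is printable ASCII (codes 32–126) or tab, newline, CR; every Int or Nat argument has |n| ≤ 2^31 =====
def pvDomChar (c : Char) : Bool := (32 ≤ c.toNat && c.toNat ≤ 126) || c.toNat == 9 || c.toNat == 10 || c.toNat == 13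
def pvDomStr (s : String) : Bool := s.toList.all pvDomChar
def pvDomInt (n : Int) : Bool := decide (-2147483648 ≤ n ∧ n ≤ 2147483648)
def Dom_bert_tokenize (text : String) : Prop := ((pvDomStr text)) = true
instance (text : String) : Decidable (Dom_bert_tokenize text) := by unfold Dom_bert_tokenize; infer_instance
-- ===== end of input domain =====

-- B replaces A's staged pipeline (lowercase whole string, split into words, second
-- loop over a special-token-padded list with a membership guard) by a single
-- character-level scan that lowercases per character and emits the word, or its two
-- subword pieces, at each whitespace boundary.

-- ===== PORT A =====
-- for long tokens mid = len(token)//2 with len ≥ 0, so token[:mid] / token[mid:] are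
-- exactly List.take / List.drop at length/2 (Nat division = Python // on nonnegatives).
def bert_tokenize (text : String) : List String :=
  let tokens := PySem.Chars.split₀ (PySem.Chars.lower text.toList)
  let tokens := "[CLS]".toList :: tokens ++ ["[SEP]".toList]
  let subword_tokens : List (List Char) :=
    tokens.foldl (fun acc token =>
      if 6 < token.length ∧ token ≠ "[CLS]".toList ∧ token ≠ "[SEP]".toList then
        acc ++ [token.take (token.length / 2), '#' :: '#' :: token.drop (token.length / 2)]
      else
        acc ++ [token]) []
  subword_tokens.map String.ofList

-- ===== PORT B =====
-- _flush from Source B: append nothing for an empty word, the two halves for a long one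
def bertFlush (out : List (List Char)) (cur : List Char) : List (List Char) :=
  if cur.isEmpty then out
  else if 6 < cur.length then
    out ++ [cur.take (cur.length / 2), '#' :: '#' :: cur.drop (cur.length / 2)]
  else out ++ [cur]

-- the character loop of Source B: state = (current word, output so far)
def bertScan : List Char → List Char → List (List Char) → List (List Char)
  | [], cur, out => bertFlush out cur
  | c :: rest, cur, out =>
    if PySem.Chars.isspace c then bertScan rest [] (bertFlush out cur)
    else bertScan rest (cur ++ [PySem.Chars.lowerChar c]) out

def bert_tokenize_alt (text : String) : List String :=
  (bertScan text.toList [] ["[CLS]".toList] ++ ["[SEP]".toList]).map String.ofList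

-- ===== PRECONDITION & SPEC =====
def Spec_bert_tokenize (text : String) (out : List String) : Prop := out = bert_tokenize_alt text
instance (text : String) (out : List String) : Decidable (Spec_bert_tokenize text out) := by unfold Spec_bert_tokenize; infer_instance

-- ===== CLAIM (what is proved, stated in full; the proofs are below) =====
def Claim_equal_bert_tokenize : Prop := ∀ (text : String), Dom_bert_tokenize text → Spec_bert_tokenize text (bert_tokenize text)

-- ===== LEMMAS AND PROOFS =====

-- the per-word pieces, shared shape of both programs (proof-side helper only)
def bertPieces (word : List Char) : List (List Char) :=
  if 6 < word.length then
    [word.take (word.length / 2), '#' :: '#' :: word.drop (word.length / 2)]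
  else [word]

-- A's guarded loop body is exactly 'append the pieces of the token': a token longer
-- than 6 characters can never equal the 5-character special tokens.
theorem bert_step_eq_pieces (acc : List (List Char)) (token : List Char) :
    (if 6 < token.length ∧ token ≠ "[CLS]".toList ∧ token ≠ "[SEP]".toList then
        acc ++ [token.take (token.length / 2), '#' :: '#' :: token.drop (token.length / 2)]
      else
        acc ++ [token])
    = acc ++ bertPieces token := by
  unfold bertPieces
  by_cases h : 6 < token.length
  · have h1 : token ≠ ['[', 'C', 'L', 'S', ']'] := by intro e; rw [e] at h; simp at h
    have h2 : token ≠ ['[', 'S', 'E', 'P', ']'] := by intro e; rw [e] at h; simp at h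
    simp [h, h1, h2]
  · simp [h]

theorem bertPieces_special : bertPieces "[CLS]".toList = ["[CLS]".toList] ∧
    bertPieces "[SEP]".toList = ["[SEP]".toList] := by decide

-- B's flush is 'append the pieces' on a nonempty word, the identity on the empty one
theorem bertFlush_eq (out : List (List Char)) (cur : List Char) :
    bertFlush out cur = out ++ if cur.isEmpty then [] else bertPieces cur := by
  unfold bertFlush bertPieces
  by_cases h : cur.isEmpty <;> by_cases h2 : 6 < cur.length <;> simp [h, h2]

-- lowering a character does not change whether it is whitespace
theorem isspace_lowerChar (c : Char) :
    PySem.Chars.isspace (PySem.Chars.lowerChar c) = PySem.Chars.isspace c := by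
  simp only [PySem.Chars.lowerChar, PySem.Chars.isupper, PySem.Chars.isspace]
  split_ifs with h
  · simp only [decide_eq_true_eq, Bool.and_eq_true, Char.le_def] at h
    have h1 : 65 ≤ c.toNat ∧ c.toNat ≤ 90 := ⟨h.1, h.2⟩
    have h3 : (Char.ofNat (c.toNat + 32)).toNat = c.toNat + 32 := by
      rw [Char.ofNat, dif_pos (by left; omega)]; rfl
    simp only [h3]
    trans false
    · simp only [Bool.or_eq_false_iff, Bool.and_eq_false_iff, decide_eq_false_iff_not]
      omega
    · symm
      simp only [Bool.or_eq_false_iff, Bool.and_eq_false_iff, decide_eq_false_iff_not]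
      omega
  · rfl

-- split₀.go's word accumulator is prepended reversed
theorem split₀_go_acc (cs : List Char) (cur : List Char) (acc : List (List Char)) :
    PySem.Chars.split₀.go cs cur acc = acc.reverse ++ PySem.Chars.split₀.go cs cur [] := by
  induction cs generalizing cur acc with
  | nil =>
    by_cases h : cur.isEmpty <;> simp [PySem.Chars.split₀.go, h]
  | cons c rest ih =>
    by_cases hs : PySem.Chars.isspace c
    · by_cases h : cur.isEmpty
      · simp only [PySem.Chars.split₀.go, hs, h, if_true]
        exact ih [] acc
      · simp only [PySem.Chars.split₀.go, hs, h, if_true]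
        rw [ih [] (cur.reverse :: acc), ih [] [cur.reverse]]
        simp
    · simp only [PySem.Chars.split₀.go, hs]
      exact ih _ _

-- the scanner of B computes: output so far ++ pieces of the words that A's
-- split-of-lowered-text pipeline produces from the remaining characters
theorem bertScan_spec (cs : List Char) (cur : List Char) (out : List (List Char)) :
    bertScan cs cur out
      = out ++ (PySem.Chars.split₀.go (cs.map PySem.Chars.lowerChar) cur.reverse []).flatMap bertPieces := by
  induction cs generalizing cur out with
  | nil =>
    simp only [bertScan, List.map_nil, PySem.Chars.split₀.go, List.isEmpty_reverse,
      List.reverse_reverse, bertFlush_eq]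
    by_cases h : cur.isEmpty <;> simp [h]
  | cons c rest ih =>
    simp only [bertScan, List.map_cons, PySem.Chars.split₀.go, isspace_lowerChar]
    by_cases hs : PySem.Chars.isspace c
    · by_cases h : cur.isEmpty
      · simp only [hs, h, if_true, List.isEmpty_reverse]
        rw [ih, bertFlush_eq]
        simp [h]
      · simp only [hs, h, if_true, List.isEmpty_reverse, List.reverse_reverse]
        rw [ih, bertFlush_eq, split₀_go_acc (List.map PySem.Chars.lowerChar rest) [] [cur]]
        simp [h]
    · simp only [hs]
      rw [ih (cur ++ [PySem.Chars.lowerChar c]) out]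
      simp

-- ===== VERDICT (by name: the statement is the Claim_ definition above) =====
theorem bert_tokenize_spec : Claim_equal_bert_tokenize := by
  intro text _
  show bert_tokenize text = bert_tokenize_alt text
  unfold bert_tokenize bert_tokenize_alt
  rw [bertScan_spec]
  simp only [funext fun acc => funext fun token => bert_step_eq_pieces acc token,
    PySem.List.foldl_append_eq_flatMap, List.nil_append, List.flatMap_cons,
    List.flatMap_append, bertPieces_special.1, bertPieces_special.2,
    List.flatMap_nil, List.append_nil, List.singleton_append]
  simp [PySem.Chars.split₀, PySem.Chars.lower, List.reverse_nil]
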